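-- pv_equiv track=rewrite | github.com/caolele/mb-test | src/trans_func.py | get_has_series_ab
-- ===== SOURCE A (Python) =====
-- def get_has_series_ab(x):
--     result = [0, 1]
--     if type(x) is not list:
--         return result
--     else:
--         for entry in x:
--             if entry == [0, 1, 0] or entry == [0, 0, 1]:
--                 return [1, 0]
--             if entry == [0, 0, 0] or entry == [0, 1, 1]:
--                 result = [0, 0]
--     return result
-- ===== SOURCE B (Python) =====
-- def get_has_series_ab(x):
--     # Two short-circuiting existence scans instead of one stateful loop:
--     # the early return makes the [1,0] case a pure existence test, and
--     # the [0,0] case likewise once [1,0] is ruled out.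
--     if type(x) is not list:
--         return [0, 1]
--     if any(e == [0, 1, 0] or e == [0, 0, 1] for e in x):
--         return [1, 0]
--     if any(e == [0, 0, 0] or e == [0, 1, 1] for e in x):
--         return [0, 0]
--     return [0, 1]
-- ===== Notes on version B (the rewrite author's own statement) =====
-- stated objective: simpler
-- what changed: Replaced A's single stateful loop (early return + mutable result flag) by two independent short-circuiting any() existence scans with fixed priority, returning constants directly.
import Mathlib
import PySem

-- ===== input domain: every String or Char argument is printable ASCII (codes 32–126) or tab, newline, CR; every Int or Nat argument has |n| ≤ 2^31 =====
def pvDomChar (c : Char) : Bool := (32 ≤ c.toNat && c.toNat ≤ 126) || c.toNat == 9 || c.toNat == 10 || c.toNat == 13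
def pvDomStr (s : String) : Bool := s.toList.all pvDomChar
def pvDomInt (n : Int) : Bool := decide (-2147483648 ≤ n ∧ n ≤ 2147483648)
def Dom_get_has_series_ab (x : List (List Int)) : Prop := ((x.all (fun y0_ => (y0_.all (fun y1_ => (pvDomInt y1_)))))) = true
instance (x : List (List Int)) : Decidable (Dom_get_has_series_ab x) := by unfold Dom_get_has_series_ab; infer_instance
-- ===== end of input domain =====

-- B replaces A's single stateful loop (early return + mutable result flag) by two
-- short-circuiting existence scans with fixed priority; objective: simpler.

-- ===== PORT A =====
-- `type(x) is not list` is always False under the type convention (x : List ...), so that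
-- branch's `return result` is unreachable; the loop is the recursion below over the same state.
def getHasSeriesAbLoop (entries : List (List Int)) (result : List Int) : List Int :=
  match entries with
  | [] => result
  | entry :: rest =>
    if entry = [0, 1, 0] ∨ entry = [0, 0, 1] then [1, 0]
    else if entry = [0, 0, 0] ∨ entry = [0, 1, 1] then getHasSeriesAbLoop rest [0, 0]
    else getHasSeriesAbLoop rest result

def get_has_series_ab (x : List (List Int)) : List Int :=
  getHasSeriesAbLoop x [0, 1]

-- ===== PORT B =====
def get_has_series_ab_alt (x : List (List Int)) : List Int :=
  if x.any (fun e => e == [0, 1, 0] || e == [0, 0, 1]) then [1, 0]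
  else if x.any (fun e => e == [0, 0, 0] || e == [0, 1, 1]) then [0, 0]
  else [0, 1]

-- ===== PRECONDITION & SPEC =====
def Spec_get_has_series_ab (x : List (List Int)) (out : List Int) : Prop := out = get_has_series_ab_alt x
instance (x : List (List Int)) (out : List Int) : Decidable (Spec_get_has_series_ab x out) := by unfold Spec_get_has_series_ab; infer_instance

-- ===== CLAIM (what is proved, stated in full; the proofs are below) =====
def Claim_equal_get_has_series_ab : Prop := ∀ (x : List (List Int)), Dom_get_has_series_ab x → Spec_get_has_series_ab x (get_has_series_ab x)

-- ===== LEMMAS AND PROOFS =====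

-- Loop characterisation: the stateful loop equals two existence tests over the rest,
-- falling back to the carried result.
theorem getHasSeriesAbLoop_char (entries : List (List Int)) (result : List Int) :
    getHasSeriesAbLoop entries result =
      if entries.any (fun e => e == [0, 1, 0] || e == [0, 0, 1]) then [1, 0]
      else if entries.any (fun e => e == [0, 0, 0] || e == [0, 1, 1]) then [0, 0]
      else result := by
  induction entries generalizing result with
  | nil => simp [getHasSeriesAbLoop]
  | cons entry rest ih =>
    simp only [getHasSeriesAbLoop, List.any_cons]
    by_cases h1 : entry = [0, 1, 0] ∨ entry = [0, 0, 1]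
    · rw [if_pos h1]
      rcases h1 with h | h <;> simp [h]
    · rw [if_neg h1]
      have ne1 : entry ≠ [0, 1, 0] := fun h => h1 (Or.inl h)
      have ne2 : entry ≠ [0, 0, 1] := fun h => h1 (Or.inr h)
      by_cases h2 : entry = [0, 0, 0] ∨ entry = [0, 1, 1]
      · rw [if_pos h2, ih]
        have e2 : ((entry == [0, 0, 0] || entry == [0, 1, 1]) = true) := by
          rcases h2 with h | h <;> simp [h]
        simp [ne1, ne2, e2]
      · have ne3 : entry ≠ [0, 0, 0] := fun h => h2 (Or.inl h)
        have ne4 : entry ≠ [0, 1, 1] := fun h => h2 (Or.inr h)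
        rw [if_neg h2, ih]
        simp [ne1, ne2, ne3, ne4]

-- ===== VERDICT (by name: the statement is the Claim_ definition above) =====
theorem get_has_series_ab_spec : Claim_equal_get_has_series_ab := by
  intro x _
  unfold Spec_get_has_series_ab get_has_series_ab get_has_series_ab_alt
  exact getHasSeriesAbLoop_char x [0, 1]
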